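-- pv_equiv track=rewrite | github.com/SilentPenguin/OpenGL.py | generate/__main__.py | type
-- ===== SOURCE A (Python) =====
-- def type(string, tail):
--     string = string or 'void'
--     if string.startswith('GL'): string = string[2:]
--     format_str = 't.{}'
--     for i in range(tail.count('*')):
--         pointer_str = 't.char_p' if string == 'char' and i == 0 else 'POINTER({})'
--         format_str = pointer_str.format(format_str)
--     return format_str.format(string)
-- ===== SOURCE B (Python) =====
-- def type(string, tail):
--     string = string or 'void'
--     if string.startswith('GL'):
--         string = string[2:]
--     n = tail.count('*')
--     if string == 'char' and n >= 1:
--         base, k = 't.char_p', n - 1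
--     else:
--         base, k = 't.' + string, n
--     return 'POINTER(' * k + base + ')' * k
-- ===== Notes on version B (the rewrite author's own statement) =====
-- stated objective: simpler
-- what changed: Replaces the inside-out template-formatting loop (repeatedly .format-ing a growing format string, with the char_p template swallowing the placeholder at i==0) by a closed-form construction: compute the pointer count n, pick the base token ('t.char_p' consuming one level when string=='char' and n>=1, else 't.'+string) and concatenate 'POINTER('*k + base + ')'*k.
import Mathlib
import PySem

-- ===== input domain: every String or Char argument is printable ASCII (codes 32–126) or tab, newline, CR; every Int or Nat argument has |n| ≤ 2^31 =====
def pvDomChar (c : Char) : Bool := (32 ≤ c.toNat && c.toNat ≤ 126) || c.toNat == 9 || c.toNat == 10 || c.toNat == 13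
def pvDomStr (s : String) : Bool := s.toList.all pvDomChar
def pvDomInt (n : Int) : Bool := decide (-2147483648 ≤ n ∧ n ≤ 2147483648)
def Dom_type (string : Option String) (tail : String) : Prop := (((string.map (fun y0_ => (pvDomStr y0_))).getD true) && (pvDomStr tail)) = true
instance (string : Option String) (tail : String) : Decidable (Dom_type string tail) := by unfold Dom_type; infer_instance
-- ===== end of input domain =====

-- B replaces the inside-out .format loop by a closed-form 'POINTER('*k + base + ')'*k construction (simpler).

-- ===== PORT A =====
-- tmpl.format(arg) for the templates A builds: each template has at most one "{}"
-- placeholder and no other brace, so replacing the first "{}" by arg is exact Python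
-- there (an argument with no placeholder present is ignored, as in Python).
def pyFormat1 : List Char → List Char → List Char
  | [], _ => []
  | [c], _ => [c]
  | c :: c2 :: rest, arg =>
    if c = '{' ∧ c2 = '}' then arg ++ rest
    else c :: pyFormat1 (c2 :: rest) arg

-- literal transliteration of A: normalize, GL strip, format loop, final .format
def type (string : Option String) (tail : String) : String :=
  let s0 := (string.getD "").toList            -- 'string or void': None and '' are falsy
  let s1 := if s0 = [] then "void".toList else s0
  let s  := if PySem.Chars.startswith s1 "GL".toList
            then PySem.List.slice s1 (some 2) none else s1
  let fstr := (List.range (PySem.Str.count tail "*")).foldl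
      (fun acc i =>
        pyFormat1 (if s = "char".toList ∧ i = 0
                   then "t.char_p".toList else "POINTER({})".toList) acc)
      "t.{}".toList
  String.ofList (pyFormat1 fstr s)

-- ===== PORT B =====
def type_alt (string : Option String) (tail : String) : String :=
  let s0 := (string.getD "").toList
  let s1 := if s0 = [] then "void".toList else s0
  let s  := if PySem.Chars.startswith s1 "GL".toList
            then PySem.List.slice s1 (some 2) none else s1
  let n := PySem.Str.count tail "*"
  let bk : List Char × Nat :=
    if s = "char".toList ∧ 1 ≤ n then ("t.char_p".toList, n - 1)
    else ("t.".toList ++ s, n)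
  String.ofList ((List.replicate bk.2 "POINTER(".toList).flatten ++ bk.1 ++ List.replicate bk.2 ')')

-- ===== PRECONDITION & SPEC =====
def Spec_type (string : Option String) (tail : String) (out : String) : Prop := out = type_alt string tail
instance (string : Option String) (tail : String) (out : String) : Decidable (Spec_type string tail out) := by unfold Spec_type; infer_instance

-- ===== CLAIM (what is proved, stated in full; the proofs are below) =====
def Claim_equal_type : Prop := ∀ (string : Option String) (tail : String), Dom_type string tail → Spec_type string tail (type string tail)

-- ===== LEMMAS AND PROOFS =====

theorem pyFormat1_cons (c : Char) (t x : List Char) (hc : c ≠ '{') :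
    pyFormat1 (c :: t) x = c :: pyFormat1 t x := by
  cases t with
  | nil => rfl
  | cons c2 r => simp [pyFormat1, hc]

theorem pyFormat1_hit (r x : List Char) :
    pyFormat1 ('{' :: '}' :: r) x = x ++ r := by
  simp [pyFormat1]

theorem fmt_skip (p t x : List Char) (h : '{' ∉ p) :
    pyFormat1 (p ++ t) x = p ++ pyFormat1 t x := by
  induction p with
  | nil => simp
  | cons c p ih =>
    simp only [List.mem_cons, not_or] at h
    rw [List.cons_append, pyFormat1_cons c _ x (fun hc => h.1 hc.symm), ih h.2, List.cons_append]

theorem fmt_no_brace (t x : List Char) (h : '{' ∉ t) : pyFormat1 t x = t := by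
  induction t with
  | nil => rfl
  | cons c t ih =>
    simp only [List.mem_cons, not_or] at h
    rw [pyFormat1_cons c t x (fun hc => h.1 hc.symm), ih h.2]

theorem fmt_ptr (x : List Char) :
    pyFormat1 "POINTER({})".toList x = "POINTER(".toList ++ x ++ [')'] := by
  have h8 : "POINTER({})".toList = "POINTER(".toList ++ '{' :: '}' :: [')'] := by decide
  rw [h8, fmt_skip _ _ _ (by decide), pyFormat1_hit]
  simp

def repPO (k : Nat) : List Char := (List.replicate k "POINTER(".toList).flatten

theorem repPO_succ (k : Nat) : repPO (k + 1) = "POINTER(".toList ++ repPO k := by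
  simp [repPO, List.replicate_succ]

theorem brace_not_mem_repPO (k : Nat) : '{' ∉ repPO k := by
  intro h
  rcases List.mem_flatten.1 h with ⟨l, hl, hc⟩
  rw [List.eq_of_mem_replicate hl] at hc
  revert hc; decide

-- the loop state after all n iterations
theorem stateA (s : List Char) (n : Nat) :
    (List.range n).foldl
      (fun acc i =>
        pyFormat1 (if s = "char".toList ∧ i = 0
                   then "t.char_p".toList else "POINTER({})".toList) acc)
      "t.{}".toList
    = if s = "char".toList ∧ 1 ≤ n
      then repPO (n - 1) ++ "t.char_p".toList ++ List.replicate (n - 1) ')'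
      else repPO n ++ "t.{}".toList ++ List.replicate n ')' := by
  induction n with
  | zero => simp [repPO]
  | succ n ih =>
    rw [List.range_succ, List.foldl_append, List.foldl_cons, List.foldl_nil, ih]
    by_cases hs : s = "char".toList
    · simp only [hs, true_and]
      rcases Nat.eq_zero_or_pos n with hn0 | hn
      · -- n = 0, i = 0: char_p template swallows the state
        subst hn0
        rw [if_pos rfl, if_neg (show ¬ (1:Nat) ≤ 0 by omega), if_pos (show 1 ≤ 0 + 1 by omega)]
        simp only [repPO, List.replicate_zero, List.flatten_nil, List.nil_append, List.append_nil]
        decide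
      · -- i = n ≥ 1: POINTER wrap of the char_p state
        rw [if_neg (show ¬ n = 0 by omega), if_pos (show 1 ≤ n by omega),
          if_pos (show 1 ≤ n + 1 by omega), fmt_ptr]
        have hn1 : n + 1 - 1 = (n - 1) + 1 := by omega
        rw [hn1, repPO_succ, List.replicate_succ']
        simp [List.append_assoc]
    · rw [if_neg (fun h => hs h.1), if_neg (fun h => hs h.1), if_neg (fun h => hs h.1), fmt_ptr,
        repPO_succ, List.replicate_succ']
      simp [List.append_assoc]

theorem core (s : List Char) (n : Nat) :
    pyFormat1
      ((List.range n).foldl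
        (fun acc i =>
          pyFormat1 (if s = "char".toList ∧ i = 0
                     then "t.char_p".toList else "POINTER({})".toList) acc)
        "t.{}".toList) s
    = (List.replicate (if s = "char".toList ∧ 1 ≤ n then n - 1 else n) "POINTER(".toList).flatten
      ++ (if s = "char".toList ∧ 1 ≤ n then "t.char_p".toList else "t.".toList ++ s)
      ++ List.replicate (if s = "char".toList ∧ 1 ≤ n then n - 1 else n) ')' := by
  rw [stateA]
  split_ifs with h
  · rw [fmt_no_brace _ _ ?_]
    · simp [repPO]
    · intro hm
      rcases List.mem_append.1 hm with hm | hm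
      · rcases List.mem_append.1 hm with hm | hm
        · exact brace_not_mem_repPO _ hm
        · revert hm; decide
      · exact absurd (List.eq_of_mem_replicate hm) (by decide)
  · rw [List.append_assoc, fmt_skip _ _ _ (brace_not_mem_repPO n)]
    have h4 : "t.{}".toList = ['t', '.', '{', '}'] := by decide
    rw [h4]
    simp only [List.cons_append, List.nil_append]
    rw [pyFormat1_cons _ _ _ (by decide), pyFormat1_cons _ _ _ (by decide), pyFormat1_hit]
    simp [repPO, List.append_assoc]

-- ===== VERDICT =====
theorem type_spec : Claim_equal_type := by
  intro string tail _
  unfold Spec_type type type_alt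
  set s0 := (string.getD "").toList with hs0
  set s1 := if s0 = [] then "void".toList else s0 with hs1
  set s := if PySem.Chars.startswith s1 "GL".toList
           then PySem.List.slice s1 (some 2) none else s1 with hs
  set n := PySem.Str.count tail "*" with hn
  simp only []
  rw [core s n]
  by_cases h : s = "char".toList ∧ 1 ≤ n
  · rw [if_pos h, if_pos h, if_pos h]
  · rw [if_neg h, if_neg h, if_neg h]
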